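-- pv_equiv track=rewrite | github.com/Arsen1302/Code-copy-detector | TestData/solutions/problem_363_4.py | solution_363_4
-- ===== SOURCE A (Python) =====
-- def solution_363_4(n: int, k: int) -> int:
--     # set dynamically programmed values array original
--     # this is where we will store the final nth run of the algorithm
--     # we will also store the prior nth valuation here up until the end
--     dynamically_programmed_values = [0]*(k+1)
--     # set the modulo_values as the value to take the modulo of when needed
--     modulo_values = int(1e9 + 7)
--     # set n_index at starting value of 1
--     # loop over range of n values
--     for n_index in range(1, n+1) :
--         # build and set a temp dynamically programmed values for this nth index
--         # this becomes the current row which we are building using the prior row which we have already built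
--         temp_dynamically_programmed_values = [0]*(k+1)
--         temp_dynamically_programmed_values[0] = 1
--         # set k_index at starting value of 1
--         # loop over range of k values
--         for k_index in range(1, k+1) :
--             # get original value result as the value at the index already listed + modulo_values
--             value = (dynamically_programmed_values[k_index] + modulo_values)
--             # if we are at a k_index greater than the n_index
--             if k_index >= n_index :
--                 # reduce the value by the prior value, otherwise, by 0
--                 value -= dynamically_programmed_values[k_index - n_index]
--             # modulo the current value
--             value %= modulo_values
--             # get the prior value, add to it the current value, and modulo
--             prior_value = temp_dynamically_programmed_values[k_index - 1]
--             current_value = value + prior_value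
--             current_value %= modulo_values
--             # set the temporary dynamically programmed values at k_index to the current value
--             temp_dynamically_programmed_values[k_index] = current_value
--         # update the final dynamically programmed values listing (aka, set the new prior row)
--         dynamically_programmed_values = temp_dynamically_programmed_values
--
--     # if k is greater than zero, get the prior_value (one before the kth instance)
--     if k > 0 :
--         prior_value = dynamically_programmed_values[k-1]
--     else :
--         prior_value = 0
--     # final value is the final kth instance plus the modulo values
--     final_value = dynamically_programmed_values[k] + modulo_values
--     # return is the difference of the kth and penultimate value, modulo by modulo values
--     return_value = (final_value - prior_value) % modulo_values
--     # int cast on return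
--     return int(return_value)
-- ===== SOURCE B (Python) =====
-- def solution_363_4(n: int, k: int) -> int:
--     # coefficient of x^k in prod_{i=1..n} (1 + x + ... + x^{i-1}) mod 1e9+7,
--     # computed by direct truncated polynomial multiplication (window sums).
--     MOD = 10**9 + 7
--     c = [1] + [0] * k
--     for i in range(2, n + 1):
--         c = [sum(c[max(0, j - i + 1):j + 1]) % MOD for j in range(k + 1)]
--     return c[k] % MOD
-- ===== Notes on version B (the rewrite author's own statement) =====
-- stated objective: simpler
-- what changed: B computes the coefficient of x^k in the q-factorial product by direct truncated polynomial multiplication (window-slice sums over a coefficient list), replacing A's two-row prefix-sum/difference DP with sentinel +MOD arithmetic and a final row-difference step.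
-- intended difference: On n <= 0 with k = 0 A returns 0, B returns 1; the empty product has constant coefficient 1 (there is exactly one permutation of zero elements with zero inversions), so B's value is the intended one. — e.g. on solution_363_4(0, 0): A returns 0, B returns 1
import Mathlib
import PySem

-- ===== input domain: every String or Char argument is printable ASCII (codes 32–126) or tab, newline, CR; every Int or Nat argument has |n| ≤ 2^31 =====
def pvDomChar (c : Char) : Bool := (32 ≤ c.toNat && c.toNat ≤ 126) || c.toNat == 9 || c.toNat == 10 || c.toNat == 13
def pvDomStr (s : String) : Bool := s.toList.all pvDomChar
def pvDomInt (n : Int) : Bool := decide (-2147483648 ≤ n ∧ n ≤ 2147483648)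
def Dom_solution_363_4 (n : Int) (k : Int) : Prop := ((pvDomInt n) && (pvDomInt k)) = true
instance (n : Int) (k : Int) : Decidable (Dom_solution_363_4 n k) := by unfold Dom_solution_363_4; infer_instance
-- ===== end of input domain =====

-- B replaces A's two-row prefix-sum/difference DP by direct truncated polynomial
-- multiplication (window-slice sums); objective: simpler. On n ≤ 0 with k = 0, B
-- intentionally returns 1 where A returns 0 (see D_ below).

-- ===== PORT A =====
-- Python lists are mutable arrays; dp/temp are ported as Array Int (index reads/writes
-- are exact here: every index the loops use is nonnegative and in range).
def solution_363_4 (n : Int) (k : Int) : Int :=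
  let M : Int := 1000000007
  let dp :=
    (PySem.List.pyRange 1 (n+1) 1).foldl (fun dp i =>
      (PySem.List.pyRange 1 (k+1) 1).foldl (fun temp j =>
        let value := dp.getD j.toNat 0 + M
        let value := if i ≤ j then value - dp.getD (j - i).toNat 0 else value
        let value := PySem.Int.mod value M
        let prior := temp.getD (j-1).toNat 0
        temp.setIfInBounds j.toNat (PySem.Int.mod (value + prior) M))
        ((Array.replicate (k+1).toNat 0).setIfInBounds 0 1))
      (Array.replicate (k+1).toNat (0:Int))
  let prior := if 0 < k then dp.getD (k-1).toNat 0 else 0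
  PySem.Int.mod (dp.getD k.toNat 0 + M - prior) M

-- ===== PORT B =====
-- c is an Array Int; the slice c[max(0,j-i+1):j+1] (nonnegative bounds, clamped like
-- Python) is Array.extract, and sum(...) is .toList.sum.
def solution_363_4_alt (n : Int) (k : Int) : Int :=
  let M : Int := 1000000007
  let c :=
    (PySem.List.pyRange 2 (n+1) 1).foldl (fun c i =>
      ((PySem.List.pyRange 0 (k+1) 1).map (fun j =>
        PySem.Int.mod ((c.extract (max 0 (j - i + 1)).toNat (j+1).toNat).toList.sum) M)).toArray)
      ((1 :: List.replicate k.toNat (0:Int)).toArray)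
  PySem.Int.mod (c.getD k.toNat 0) M

-- ===== PRECONDITION & SPEC =====
-- Pre_ excludes k < 0, on which the Python A raises IndexError (its DP row [0]*(k+1) is empty).
def Pre_solution_363_4 (n : Int) (k : Int) : Prop := 0 ≤ k
instance (n : Int) (k : Int) : Decidable (Pre_solution_363_4 n k) := by unfold Pre_solution_363_4; infer_instance
def pvWitness_solution_363_4 : Int × Int := (3, 2)

-- On n ≤ 0 with k = 0 A returns 0, B returns 1; the empty product has constant
-- coefficient 1 (one permutation of zero elements with zero inversions), so B's value is intended.
def D_solution_363_4 (n : Int) (k : Int) : Prop := n ≤ 0 ∧ k = 0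
instance (n : Int) (k : Int) : Decidable (D_solution_363_4 n k) := by unfold D_solution_363_4; infer_instance

def Spec_solution_363_4 (n : Int) (k : Int) (out : Int) : Prop := ¬ D_solution_363_4 n k → out = solution_363_4_alt n k
instance (n : Int) (k : Int) (out : Int) : Decidable (Spec_solution_363_4 n k out) := by unfold Spec_solution_363_4; infer_instance

def pvDiffWitness_solution_363_4 : Int × Int := (0, 0)
def pvDiffWitnessOut_solution_363_4 : Int × Int := (0, 1)

-- ===== CLAIM (what is proved, stated in full; the proofs are below) =====
def Claim_unchanged_solution_363_4 : Prop := ∀ (n : Int) (k : Int), Dom_solution_363_4 n k → Pre_solution_363_4 n k → Spec_solution_363_4 n k (solution_363_4 n k)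
def Claim_changed_solution_363_4 : Prop := Dom_solution_363_4 (pvDiffWitness_solution_363_4.1) (pvDiffWitness_solution_363_4.2) ∧ Pre_solution_363_4 (pvDiffWitness_solution_363_4.1) (pvDiffWitness_solution_363_4.2) ∧ D_solution_363_4 (pvDiffWitness_solution_363_4.1) (pvDiffWitness_solution_363_4.2) ∧ solution_363_4 (pvDiffWitness_solution_363_4.1) (pvDiffWitness_solution_363_4.2) = pvDiffWitnessOut_solution_363_4.1 ∧ solution_363_4_alt (pvDiffWitness_solution_363_4.1) (pvDiffWitness_solution_363_4.2) = pvDiffWitnessOut_solution_363_4.2 ∧ pvDiffWitnessOut_solution_363_4.1 ≠ pvDiffWitnessOut_solution_363_4.2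
def Claim_exact_solution_363_4 : Prop := ∀ (n : Int) (k : Int), Dom_solution_363_4 n k → Pre_solution_363_4 n k → D_solution_363_4 n k → solution_363_4 n k ≠ solution_363_4_alt n k

-- ===== LEMMAS AND PROOFS =====

/-- The modulus. -/
def pvM : Int := 1000000007
def psum (f : ℕ → Int) : ℕ → Int
  | 0 => f 0
  | j+1 => psum f j + f (j+1)
def fB : ℕ → ℕ → Int
  | 0, j => if j = 0 then 1 else 0
  | m+1, j => (psum (fB m) j - (if m+2 ≤ j then psum (fB m) (j - (m+2)) else 0)) % pvM
def gA (m j : ℕ) : Int := psum (fB m) j % pvM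
def innerQ (p : ℕ → Int) (i : ℕ) : ℕ → Int
  | 0 => 1
  | j+1 => PySem.Int.mod
      (PySem.Int.mod (p (j+1) + pvM - (if i ≤ j+1 then p (j+1-i) else 0)) pvM + innerQ p i j) pvM

theorem fB_mod (m j : ℕ) : fB m j % pvM = fB m j := by
  cases m with
  | zero => simp only [fB]; split_ifs <;> norm_num [pvM]
  | succ m => simp only [fB]; exact Int.emod_emod_of_dvd _ dvd_rfl

theorem fB_zero (m : ℕ) : fB m 0 = 1 := by
  induction m with
  | zero => simp [fB]
  | succ m ih => simp [fB, psum, ih]; norm_num [pvM]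

theorem psum_fB0 (j : ℕ) : psum (fB 0) j = 1 := by
  induction j with
  | zero => simp [psum, fB]
  | succ j ih => simp only [psum, ih]; simp [fB]

theorem gA_zero_row (j : ℕ) : gA 0 j = 1 := by
  simp [gA, psum_fB0]; norm_num [pvM]

theorem gA_zero_col (m : ℕ) : gA m 0 = 1 := by
  simp [gA, psum, fB_zero]; norm_num [pvM]

theorem innerQ_base (j : ℕ) : innerQ (fun _ => 0) 1 j = gA 0 j := by
  induction j with
  | zero => simp [innerQ, gA_zero_row]
  | succ j ih =>
      rw [gA_zero_row]
      rw [gA_zero_row] at ih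
      simp only [innerQ, ih]
      norm_num [PySem.Int.mod_eq_emod_of_pos (by norm_num [pvM] : (0:Int) < pvM), pvM]

theorem emod_aux (a b s M : Int) :
    ((a % M + M - b % M) % M + s % M) % M = (s + (a - b) % M) % M := by
  have h1 : a % M + M - b % M = (a % M - b % M) + M := by ring
  rw [h1, Int.add_emod_right, ← Int.sub_emod]
  conv_lhs => rw [← Int.add_emod]
  conv_rhs => rw [Int.add_emod, Int.emod_emod_of_dvd _ dvd_rfl, ← Int.add_emod]
  ring_nf

theorem innerQ_step (m j : ℕ) : innerQ (gA m) (m+2) j = gA (m+1) j := by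
  have hM : (0:Int) < pvM := by norm_num [pvM]
  induction j with
  | zero => simp [innerQ, gA_zero_col]
  | succ j ih =>
      simp only [innerQ, ih, PySem.Int.mod_eq_emod_of_pos hM]
      have hrhs : gA (m+1) (j+1) = (psum (fB (m+1)) j + fB (m+1) (j+1)) % pvM := by
        simp [gA, psum]
      rw [hrhs]
      simp only [gA]
      by_cases hc : m + 2 ≤ j + 1
      · simp only [if_pos hc]
        rw [emod_aux]
        congr 1
        simp only [fB]
        rw [if_pos hc]
      · simp only [if_neg hc]
        have h0 : (0:Int) = (0:Int) % pvM := by norm_num [pvM]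
        rw [h0, emod_aux]
        congr 1
        simp only [fB]
        rw [if_neg hc]

theorem inner_loop (pfun : ℕ → Int) (iZ : Int) (iN : ℕ) (hiz : iZ = (iN:Int)) (hi : 1 ≤ iN) (kn j : ℕ) (hj : j ≤ kn) :
    (PySem.List.pyRange 1 ((j:Int)+1) 1).foldl (fun temp jj =>
        PySem.List.pySetD temp jj (PySem.Int.mod (PySem.Int.mod
          (if iZ ≤ jj then PySem.List.pyGetD ((List.range (kn+1)).map pfun) jj 0 + pvM - PySem.List.pyGetD ((List.range (kn+1)).map pfun) (jj - iZ) 0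
           else PySem.List.pyGetD ((List.range (kn+1)).map pfun) jj 0 + pvM) pvM
          + PySem.List.pyGetD temp (jj-1) 0) pvM))
      (PySem.List.pySetD (List.replicate (kn+1) 0) 0 1)
    = (List.range (kn+1)).map (fun t => if t ≤ j then innerQ pfun iN t else 0) := by
  subst hiz
  induction j with
  | zero =>
      rw [PySem.List.pyRange_one_eq_nil (by omega)]
      simp only [List.foldl_nil]
      have h0 : PySem.List.pySetD (List.replicate (kn+1) (0:Int)) 0 1
          = List.set (List.replicate (kn+1) 0) 0 1 := by
        exact_mod_cast PySem.List.pySetD_natCast (n := 0) (xs := List.replicate (kn+1) (0:Int)) (v := 1)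
      rw [h0]
      apply List.ext_getElem
      · simp
      · intro t h1 h2
        simp only [List.getElem_set, List.getElem_replicate, List.getElem_map, List.getElem_range] at *
        by_cases ht : t = 0
        · simp [ht, innerQ]
        · simp [ht]; omega
  | succ j ih =>
      rw [show ((j+1:ℕ):Int) + 1 = ((j:Int)+1) + 1 by push_cast; ring]
      rw [PySem.List.pyRange_one_succ_right (by omega)]
      rw [List.foldl_append, ih (by omega)]
      simp only [List.foldl_cons, List.foldl_nil]
      -- the j+1 step
      have hjk : j + 1 < kn + 1 := by omega
      -- reads
      have hdp : ∀ (t : ℕ), t ≤ kn → PySem.List.pyGetD ((List.range (kn+1)).map pfun) ((t:Int)) 0 = pfun t := by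
        intro t ht
        rw [PySem.List.pyGetD_natCast]
        simp [List.getD, Nat.lt_succ_of_le ht]
      have hprior : PySem.List.pyGetD ((List.range (kn+1)).map (fun t => if t ≤ j then innerQ pfun iN t else 0)) ((j:Int)+1-1) 0 = innerQ pfun iN j := by
        rw [show ((j:Int)+1-1) = ((j:ℕ):Int) by ring]
        rw [PySem.List.pyGetD_natCast]
        simp [List.getD, Nat.lt_succ_of_le (show j ≤ kn by omega)]
      have e1 : PySem.List.pyGetD ((List.range (kn+1)).map pfun) ((j:Int)+1) 0 = pfun (j+1) := by
        rw [show ((j:Int)+1) = ((j+1:ℕ):Int) by push_cast; ring]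
        exact hdp _ (by omega)
      rw [hprior]
      by_cases hin : iN ≤ j + 1
      · rw [if_pos (show (iN:Int) ≤ (j:Int)+1 by exact_mod_cast hin), e1]
        have e2 : PySem.List.pyGetD ((List.range (kn+1)).map pfun) ((j:Int)+1-(iN:Int)) 0 = pfun (j+1-iN) := by
          rw [show (j:Int)+1-(iN:Int) = ((j+1-iN:ℕ):Int) by omega]
          exact hdp _ (by omega)
        rw [e2]
        rw [show ((j:Int)+1) = ((j+1:ℕ):Int) by push_cast; ring, PySem.List.pySetD_natCast]
        apply List.ext_getElem
        · simp
        · intro t h1 h2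
          simp only [List.getElem_set, List.getElem_map, List.getElem_range, List.length_set,
            List.length_map, List.length_range] at *
          by_cases ht : t = j + 1
          · subst ht
            rw [if_pos rfl, if_pos (le_refl (j+1))]
            simp only [innerQ, if_pos hin]
          · rw [if_neg (Ne.symm ht)]
            by_cases htj : t ≤ j
            · rw [if_pos htj, if_pos (by omega : t ≤ j + 1)]
            · rw [if_neg htj, if_neg (by omega : ¬ t ≤ j + 1)]
      · rw [if_neg (show ¬ (iN:Int) ≤ (j:Int)+1 by exact_mod_cast hin), e1]
        rw [show ((j:Int)+1) = ((j+1:ℕ):Int) by push_cast; ring, PySem.List.pySetD_natCast]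
        apply List.ext_getElem
        · simp
        · intro t h1 h2
          simp only [List.getElem_set, List.getElem_map, List.getElem_range, List.length_set,
            List.length_map, List.length_range] at *
          by_cases ht : t = j + 1
          · subst ht
            rw [if_pos rfl, if_pos (le_refl (j+1))]
            simp only [innerQ, if_neg hin]
            simp
          · rw [if_neg (Ne.symm ht)]
            by_cases htj : t ≤ j
            · rw [if_pos htj, if_pos (by omega : t ≤ j + 1)]
            · rw [if_neg htj, if_neg (by omega : ¬ t ≤ j + 1)]

theorem sum_range'_map (f : ℕ → Int) (a n : ℕ) :
    ((List.range' a (n+1)).map f).sum = psum f (a+n) - (if 1 ≤ a then psum f (a-1) else 0) := by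
  induction n with
  | zero =>
      simp only [List.range'_one, List.map_cons, List.map_nil, List.sum_cons, List.sum_nil,
        Nat.add_zero, add_zero]
      cases a with
      | zero => simp [psum]
      | succ b => simp [psum]
  | succ n ih =>
      rw [List.range'_concat, List.map_append, List.sum_append, ih]
      simp only [List.map_cons, List.map_nil, List.sum_cons, List.sum_nil, add_zero]
      rw [show a + (n+1) = (a+n) + 1 by omega]
      simp [psum]
      ring

theorem B_rows (kn m : ℕ) :
    (PySem.List.pyRange 2 ((m:Int)+2) 1).foldl (fun c i =>
        (PySem.List.pyRange 0 ((kn:Int)+1) 1).map (fun j =>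
          PySem.Int.mod (PySem.List.slice c (some (max 0 (j - i + 1))) (some (j+1))).sum pvM))
      (1 :: List.replicate kn 0)
    = (List.range (kn+1)).map (fB m) := by
  induction m with
  | zero =>
      rw [show ((0:ℕ):Int)+2 = 2 by norm_num, PySem.List.pyRange_one_eq_nil (a := 2) (b := 2) (by omega)]
      simp only [List.foldl_nil]
      apply List.ext_getElem
      · simp
      · intro t h1 h2
        simp only [List.getElem_map, List.getElem_range]
        cases t with
        | zero => simp [fB]
        | succ u =>
            simp only [List.getElem_cons_succ, fB]
            have : u < kn := by simpa using h1
            simp [List.getElem_replicate]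
  | succ m ih =>
      rw [show ((m+1:ℕ):Int)+2 = ((m:Int)+2)+1 by push_cast; ring,
        PySem.List.pyRange_one_succ_right (a := 2) (b := (m:Int)+2) (by omega), List.foldl_append, ih]
      simp only [List.foldl_cons, List.foldl_nil]
      rw [show ((kn:Int)+1) = ((kn+1:ℕ):Int) by push_cast; ring, PySem.List.pyRange_zero_nat]
      rw [List.map_map]
      apply List.map_congr_left
      intro j hj
      have hjk : j ≤ kn := by simp at hj; omega
      simp only [Function.comp]
      have hmax : max 0 ((j:Int) - ((m:Int)+2) + 1) = ((j - (m+1) : ℕ):Int) := by omega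
      rw [hmax, show ((j:Int)+1) = ((j+1:ℕ):Int) by push_cast; ring]
      rw [PySem.List.slice_natCast]
      rw [← List.map_drop, ← List.map_take, List.range_eq_range', List.drop_range']
      have htake : (j+1) - (j - (m+1)) = (j - (j - (m+1))) + 1 := by omega
      rw [htake]
      rw [List.take_range'_of_length_ge (by omega)]
      rw [show (0 + (j - (m+1)) * 1) = j - (m+1) by omega]
      rw [sum_range'_map]
      have hidx : j - (m+1) + (j - (j - (m+1))) = j := by omega
      rw [hidx]
      simp only [fB]
      rw [PySem.Int.mod_eq_emod_of_pos (by norm_num [pvM])]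
      congr 1
      by_cases hc : m + 2 ≤ j
      · rw [if_pos (by omega : 1 ≤ j - (m+1)), if_pos hc,
          show j - (m+1) - 1 = j - (m+2) from by omega]
      · rw [if_neg (by omega : ¬ 1 ≤ j - (m+1)), if_neg hc]

theorem A_rows (kn m : ℕ) :
    (PySem.List.pyRange 1 ((m:Int)+2) 1).foldl (fun dp i =>
        (PySem.List.pyRange 1 ((kn:Int)+1) 1).foldl (fun temp j =>
          PySem.List.pySetD temp j (PySem.Int.mod (PySem.Int.mod
            (if i ≤ j then PySem.List.pyGetD dp j 0 + pvM - PySem.List.pyGetD dp (j - i) 0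
             else PySem.List.pyGetD dp j 0 + pvM) pvM
            + PySem.List.pyGetD temp (j-1) 0) pvM))
          (PySem.List.pySetD (List.replicate (kn+1) 0) 0 1))
      (List.replicate (kn+1) 0)
    = (List.range (kn+1)).map (gA m) := by
  have hrepl : (List.replicate (kn+1) (0:Int)) = (List.range (kn+1)).map (fun _ => (0:Int)) := by
    simp [List.map_const']
  induction m with
  | zero =>
      rw [show ((0:ℕ):Int)+2 = 1+1 by norm_num, PySem.List.pyRange_one_singleton]
      simp only [List.foldl_cons, List.foldl_nil]
      rw [show PySem.List.pyGetD (List.replicate (kn+1) (0:Int))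
            = PySem.List.pyGetD ((List.range (kn+1)).map (fun _ => (0:Int))) from by rw [← hrepl]]
      rw [show ((kn:Int)+1) = ((kn:ℕ):Int)+1 by norm_num]
      rw [inner_loop (fun _ => 0) 1 1 (by norm_num) (le_refl 1) kn kn (le_refl kn)]
      apply List.map_congr_left
      intro t ht
      have : t ≤ kn := by simp at ht; omega
      rw [if_pos this, innerQ_base]
  | succ m ih =>
      rw [show ((m+1:ℕ):Int)+2 = ((m:Int)+2)+1 by push_cast; ring,
        PySem.List.pyRange_one_succ_right (a := 1) (b := (m:Int)+2) (by omega), List.foldl_append, ih]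
      simp only [List.foldl_cons, List.foldl_nil]
      rw [show ((kn:Int)+1) = ((kn:ℕ):Int)+1 by norm_num]
      rw [inner_loop (gA m) ((m:Int)+2) (m+2) (by push_cast; ring) (by omega) kn kn (le_refl kn)]
      apply List.map_congr_left
      intro t ht
      have : t ≤ kn := by simp at ht; omega
      rw [if_pos this, innerQ_step]


theorem emod_aux2 (a b M : Int) : (a % M + M - b % M) % M = (a - b) % M := by
  rw [show a % M + M - b % M = (a % M - b % M) + M by ring, Int.add_emod_right, ← Int.sub_emod]

theorem final_eq (r kn : ℕ) :
    (gA r kn + pvM - (if 0 < kn then gA r (kn-1) else 0)) % pvM = fB r kn := by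
  cases kn with
  | zero =>
      simp only [if_neg (by omega : ¬ (0:ℕ) < 0)]
      have h : gA r 0 = fB r 0 % pvM := by simp [gA, psum]
      rw [h, sub_zero, Int.add_emod_right, Int.emod_emod_of_dvd _ dvd_rfl, fB_mod]
  | succ j =>
      simp only [if_pos (by omega : 0 < j + 1), Nat.add_sub_cancel]
      simp only [gA]
      rw [emod_aux2, show psum (fB r) (j+1) - psum (fB r) j = fB r (j+1) from by simp [psum],
        fB_mod]

theorem getD_map_range_lem (f : ℕ → Int) (kn t : ℕ) (ht : t ≤ kn) :
    ((List.range (kn+1)).map f).getD t 0 = f t := by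
  simp [List.getD, Nat.lt_succ_of_le ht]

theorem arr_getD (a : Array Int) (i : ℕ) (d : Int) : a.getD i d = a.toList.getD i d := by
  simp only [Array.getD, List.getD]
  by_cases h : i < a.size
  · simp [h, Array.getElem?_eq_getElem]
  · have hlen : a.toList.length ≤ i := by simp [Array.length_toList]; omega
    simp [h, List.getElem?_eq_none hlen]

/-- The Array-based inner loop of port A computes, on `toList`, the list-based loop. -/
theorem inner_hom (dp : Array Int) (i : Int) (rng : List Int) (hrng : ∀ x ∈ rng, 1 ≤ x)
    (t0 : Array Int) :
    (rng.foldl (fun temp j =>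
        temp.setIfInBounds j.toNat (PySem.Int.mod (PySem.Int.mod
          (if i ≤ j then dp.getD j.toNat 0 + pvM - dp.getD (j - i).toNat 0
           else dp.getD j.toNat 0 + pvM) pvM
          + temp.getD (j-1).toNat 0) pvM)) t0).toList
    = rng.foldl (fun temp j =>
        PySem.List.pySetD temp j (PySem.Int.mod (PySem.Int.mod
          (if i ≤ j then PySem.List.pyGetD dp.toList j 0 + pvM - PySem.List.pyGetD dp.toList (j - i) 0
           else PySem.List.pyGetD dp.toList j 0 + pvM) pvM
          + PySem.List.pyGetD temp (j-1) 0) pvM)) t0.toList := by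
  induction rng generalizing t0 with
  | nil => simp
  | cons j t ih =>
      have hj : 1 ≤ j := hrng j (by simp)
      simp only [List.foldl_cons]
      rw [ih (fun x hx => hrng x (by simp [hx]))]
      congr 1
      rw [PySem.List.pySetD_of_nonneg _ _ (by omega : (0:Int) ≤ j), Array.toList_setIfInBounds]
      congr 1
      rw [PySem.List.pyGetD_of_nonneg _ _ (by omega : (0:Int) ≤ j - 1)]
      congr 2
      · by_cases hij : i ≤ j
        · rw [if_pos hij, if_pos hij,
            PySem.List.pyGetD_of_nonneg _ _ (by omega : (0:Int) ≤ j),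
            PySem.List.pyGetD_of_nonneg _ _ (by omega : (0:Int) ≤ j - i), arr_getD, arr_getD]
        · rw [if_neg hij, if_neg hij, PySem.List.pyGetD_of_nonneg _ _ (by omega : (0:Int) ≤ j), arr_getD]
      · exact arr_getD t0 (j-1).toNat 0

/-- The Array-based outer loop of port A computes, on `toList`, the list-based loop. -/
theorem outer_hom (k : Int) (rng : List Int) (dp0 : Array Int) :
    (rng.foldl (fun dp i =>
        (PySem.List.pyRange 1 (k+1) 1).foldl (fun temp j =>
          temp.setIfInBounds j.toNat (PySem.Int.mod (PySem.Int.mod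
            (if i ≤ j then dp.getD j.toNat 0 + pvM - dp.getD (j - i).toNat 0
             else dp.getD j.toNat 0 + pvM) pvM
            + temp.getD (j-1).toNat 0) pvM))
          ((Array.replicate (k+1).toNat 0).setIfInBounds 0 1)) dp0).toList
    = rng.foldl (fun dp i =>
        (PySem.List.pyRange 1 (k+1) 1).foldl (fun temp j =>
          PySem.List.pySetD temp j (PySem.Int.mod (PySem.Int.mod
            (if i ≤ j then PySem.List.pyGetD dp j 0 + pvM - PySem.List.pyGetD dp (j - i) 0
             else PySem.List.pyGetD dp j 0 + pvM) pvM
            + PySem.List.pyGetD temp (j-1) 0) pvM))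
          (PySem.List.pySetD (List.replicate (k+1).toNat 0) 0 1)) dp0.toList := by
  induction rng generalizing dp0 with
  | nil => simp
  | cons i t ih =>
      simp only [List.foldl_cons]
      rw [ih]
      congr 1
      rw [inner_hom _ _ _ (fun x hx => ((PySem.List.mem_pyRange_one).mp hx).1)]
      rw [Array.toList_setIfInBounds, Array.toList_replicate,
        PySem.List.pySetD_of_nonneg _ _ (by omega : (0:Int) ≤ 0)]
      rfl

/-- The Array-based loop of port B computes, on `toList`, the list-based loop. -/
theorem B_hom (k : Int) (rng : List Int) (c0 : Array Int) :
    (rng.foldl (fun c i =>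
        ((PySem.List.pyRange 0 (k+1) 1).map (fun j =>
          PySem.Int.mod ((c.extract (max 0 (j - i + 1)).toNat (j+1).toNat).toList.sum) pvM)).toArray) c0).toList
    = rng.foldl (fun c i =>
        (PySem.List.pyRange 0 (k+1) 1).map (fun j =>
          PySem.Int.mod (PySem.List.slice c (some (max 0 (j - i + 1))) (some (j+1))).sum pvM)) c0.toList := by
  induction rng generalizing c0 with
  | nil => simp
  | cons i t ih =>
      simp only [List.foldl_cons]
      rw [ih]
      congr 1
      rw [List.toList_toArray]
      apply List.map_congr_left
      intro j hj
      have hj0 : (0:Int) ≤ j := ((PySem.List.mem_pyRange_one).mp hj).1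
      rw [PySem.List.slice_toNat c0.toList (a := max 0 (j - i + 1)) (b := j + 1) (by omega) (by omega)]
      rw [Array.toList_extract]

theorem main_eq (n k : Int) (hk : 0 ≤ k) (hd : ¬ (n ≤ 0 ∧ k = 0)) :
    solution_363_4 n k = solution_363_4_alt n k := by
  have hM : (0:Int) < pvM := by norm_num [pvM]
  obtain ⟨kn, hkn⟩ : ∃ kn : ℕ, k = (kn:Int) := ⟨k.toNat, by omega⟩
  subst hkn
  simp only [solution_363_4, solution_363_4_alt]
  rw [show (1000000007:Int) = pvM from rfl]
  rw [arr_getD, arr_getD, arr_getD]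
  rw [outer_hom, B_hom, Array.toList_replicate, List.toList_toArray]
  rw [Int.toNat_natCast, show ((kn:Int)+1).toNat = kn + 1 by omega]
  by_cases hn : n ≤ 0
  · -- both loops are empty
    have hk1 : 1 ≤ kn := by
      rcases Nat.eq_zero_or_pos kn with h | h
      · exact absurd ⟨hn, by simp [h]⟩ hd
      · omega
    rw [PySem.List.pyRange_one_eq_nil (a := 1) (b := n+1) (by omega),
      PySem.List.pyRange_one_eq_nil (a := 2) (b := n+1) (by omega)]
    simp only [List.foldl_nil]
    rw [if_pos (by exact_mod_cast hk1 : (0:Int) < (kn:Int))]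
    rw [show ((kn:Int)-1).toNat = kn - 1 by omega]
    obtain ⟨u, hu⟩ : ∃ u, kn = u + 1 := ⟨kn - 1, by omega⟩
    subst hu
    simp [List.getD]
    norm_num [PySem.Int.mod_eq_emod_of_pos hM, pvM]
  · -- n ≥ 1
    obtain ⟨m, hm⟩ : ∃ m : ℕ, n = ((m:Int)) + 1 := ⟨(n-1).toNat, by omega⟩
    subst hm
    rw [show (m:Int) + 1 + 1 = (m:Int) + 2 by ring]
    rw [A_rows kn m, B_rows kn m]
    rw [getD_map_range_lem _ _ _ (le_refl kn), getD_map_range_lem _ _ _ (le_refl kn)]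
    rw [PySem.Int.mod_eq_emod_of_pos hM, PySem.Int.mod_eq_emod_of_pos hM, fB_mod]
    by_cases hkpos : 0 < kn
    · rw [if_pos (by exact_mod_cast hkpos : (0:Int) < (kn:Int))]
      rw [show ((kn:Int)-1).toNat = kn - 1 by omega]
      rw [getD_map_range_lem _ _ _ (by omega)]
      have := final_eq m kn
      rw [if_pos hkpos] at this
      exact this
    · rw [if_neg (by exact_mod_cast hkpos : ¬ (0:Int) < (kn:Int))]
      have := final_eq m kn
      rw [if_neg hkpos] at this
      exact this

theorem tight_aux (n : Int) (hn : n ≤ 0) : solution_363_4 n 0 = 0 ∧ solution_363_4_alt n 0 = 1 := by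
  simp only [solution_363_4, solution_363_4_alt]
  rw [PySem.List.pyRange_one_eq_nil (a := 1) (b := n+1) (by omega),
      PySem.List.pyRange_one_eq_nil (a := 2) (b := n+1) (by omega)]
  constructor <;> decide

-- ===== VERDICT (by name: the statement is the Claim_ definition above) =====
theorem solution_363_4_spec : Claim_unchanged_solution_363_4 := by
  intro n k _ hpre hnd
  exact main_eq n k hpre hnd

theorem solution_363_4_changed : Claim_changed_solution_363_4 := by
  unfold Claim_changed_solution_363_4; decide

theorem solution_363_4_tight : Claim_exact_solution_363_4 := by
  intro n k _ _ hD
  obtain ⟨hn, hk0⟩ := hD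
  subst hk0
  obtain ⟨hA, hB⟩ := tight_aux n hn
  rw [hA, hB]
  decide
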